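-- pv_equiv track=rewrite | github.com/lancelote/advent_of_code | src/year2021/day03a.py | count_zeros_and_ones
-- ===== SOURCE A (Python) =====
-- from collections.abc import Iterator
--
-- def count_zeros_and_ones(bits: Iterator[str]) -> tuple[int, int]:
--     zeros = 0
--     ones = 0
--
--     for bit in bits:
--         if bit == "0":
--             zeros += 1
--         else:
--             ones += 1
--
--     return zeros, ones
-- ===== SOURCE B (Python) =====
-- def count_zeros_and_ones(bits):
--     def go(seg):
--         n = len(seg)
--         if n == 0:
--             return (0, 0)
--         if n == 1:
--             return (1, 0) if seg[0] == "0" else (0, 1)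
--         mid = n // 2
--         z1, o1 = go(seg[:mid])
--         z2, o2 = go(seg[mid:])
--         return (z1 + z2, o1 + o2)
--     return go(list(bits))
-- ===== Notes on version B (the rewrite author's own statement) =====
-- stated objective: alternative
-- what changed: Replaces the single linear pass with two parallel accumulators by a divide-and-conquer recursion that splits the list in half, counts each half independently, and sums the pair results.
import Mathlib
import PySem

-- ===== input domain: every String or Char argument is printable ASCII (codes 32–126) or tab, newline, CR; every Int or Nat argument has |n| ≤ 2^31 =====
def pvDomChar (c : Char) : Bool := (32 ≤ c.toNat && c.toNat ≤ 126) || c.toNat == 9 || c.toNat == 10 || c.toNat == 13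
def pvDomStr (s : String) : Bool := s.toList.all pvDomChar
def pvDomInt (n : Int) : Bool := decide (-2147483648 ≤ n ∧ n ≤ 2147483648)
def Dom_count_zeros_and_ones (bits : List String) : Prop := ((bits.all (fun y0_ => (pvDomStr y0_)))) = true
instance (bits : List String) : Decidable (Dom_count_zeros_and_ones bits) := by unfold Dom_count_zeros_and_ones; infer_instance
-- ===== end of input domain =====

-- B replaces the linear two-accumulator loop by a divide-and-conquer recursion on list halves (objective: alternative).

-- ===== PORT A =====
-- loop over bits with two accumulators (zeros, ones)
def count_zeros_and_ones (bits : List String) : Int × Int :=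
  bits.foldl (fun (acc : Int × Int) bit =>
    if bit == "0" then (acc.1 + 1, acc.2) else (acc.1, acc.2 + 1)) (0, 0)

-- ===== PORT B =====
-- go(seg): split seg at len//2, recurse on both halves, add the pairs
def pvGoB (seg : List String) : Int × Int :=
  let n := seg.length
  if n = 0 then (0, 0)
  else if n = 1 then (if seg.headD "" == "0" then (1, 0) else (0, 1))
  else
    let mid := n / 2
    let p1 := pvGoB (seg.take mid)
    let p2 := pvGoB (seg.drop mid)
    (p1.1 + p2.1, p1.2 + p2.2)
termination_by seg.length
decreasing_by
  · simp only [List.length_take]; omega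
  · simp only [List.length_drop]; omega

def count_zeros_and_ones_alt (bits : List String) : Int × Int := pvGoB bits

-- ===== PRECONDITION & SPEC =====
def Spec_count_zeros_and_ones (bits : List String) (out : Int × Int) : Prop := out = count_zeros_and_ones_alt bits
instance (bits : List String) (out : Int × Int) : Decidable (Spec_count_zeros_and_ones bits out) := by unfold Spec_count_zeros_and_ones; infer_instance

-- ===== CLAIM (what is proved, stated in full; the proofs are below) =====
def Claim_equal_count_zeros_and_ones : Prop := ∀ (bits : List String), Dom_count_zeros_and_ones bits → Spec_count_zeros_and_ones bits (count_zeros_and_ones bits)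

-- ===== LEMMAS AND PROOFS =====
theorem count_zeros_and_ones_foldl (bits : List String) (z o : Int) :
    bits.foldl (fun (acc : Int × Int) bit =>
      if bit == "0" then (acc.1 + 1, acc.2) else (acc.1, acc.2 + 1)) (z, o)
    = (z + (bits.count "0" : Int),
       o + (bits.length : Int) - (bits.count "0" : Int)) := by
  induction bits generalizing z o with
  | nil => simp
  | cons b bs ih =>
    by_cases h : b = "0"
    · rw [List.foldl_cons]; simp only [h, beq_self_eq_true, if_true]
      rw [ih]; simp; constructor <;> ring
    · rw [List.foldl_cons]
      have hb : (b == "0") = false := by simp [h]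
      rw [hb]; simp only [if_false, Bool.false_eq_true]
      rw [ih]
      have : (b :: bs).count "0" = bs.count "0" := by simp [h]
      rw [this]; simp [List.length_cons]; ring

theorem pvGoB_eq (seg : List String) :
    pvGoB seg = ((seg.count "0" : Int), (seg.length : Int) - (seg.count "0" : Int)) := by
  generalize hn : seg.length = n
  induction n using Nat.strong_induction_on generalizing seg with
  | _ n ih =>
    rw [pvGoB]
    simp only [hn]
    by_cases h0 : n = 0
    · have hseg : seg = [] := List.eq_nil_of_length_eq_zero (by omega)
      subst hseg; simp [h0]
    · simp only [h0, if_false]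
      by_cases h1 : n = 1
      · simp only [h1, if_true]
        match seg, (h1 ▸ hn : seg.length = 1) with
        | [b], _ =>
          by_cases hb : b = "0"
          · simp [hb]
          · have : (b == "0") = false := by simp [hb]
            simp [List.headD, this, hb]
      · simp only [h1, if_false]
        have hlt : n / 2 < n := Nat.div_lt_self (Nat.pos_of_ne_zero h0) (by norm_num)
        have htl : (seg.take (n / 2)).length = n / 2 := by
          simp [List.length_take, hn]; omega
        have hdl : (seg.drop (n / 2)).length = n - n / 2 := by
          simp [List.length_drop, hn]
        rw [ih (n / 2) hlt _ htl, ih (n - n / 2) (by omega) _ hdl]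
        have hcount : (seg.take (n / 2)).count "0" + (seg.drop (n / 2)).count "0" = seg.count "0" := by
          rw [← List.count_append, List.take_append_drop]
        have h2 : 2 ≤ n := by omega
        simp only [Prod.mk.injEq]
        omega

-- ===== VERDICT (by name: the statement is the Claim_ definition above) =====
theorem count_zeros_and_ones_spec : Claim_equal_count_zeros_and_ones := by
  intro bits _
  unfold Spec_count_zeros_and_ones count_zeros_and_ones count_zeros_and_ones_alt
  rw [count_zeros_and_ones_foldl, pvGoB_eq]
  simp
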